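-- pv_equiv track=rewrite | github.com/molcathy/cl_calculator | src/graph_scale.py | repeat_until_value
-- ===== SOURCE A (Python) =====
-- def repeat_until_value(current, endvalue):
--     e = endvalue
--     c = current
--     if endvalue > c:
--         if endvalue > 0:
--             while c < (endvalue + (endvalue * 10)):
--                 c += 1
--         elif endvalue < 0:
--             while c < (endvalue + (endvalue * -10)):
--                 c += 1
--         elif endvalue == 0:
--             c += 10
--
--     elif endvalue < c:
--         if endvalue > 0:
--             while c > (endvalue - (endvalue * 10)):
--                 c -= 1
--         elif endvalue < 0:
--             while c > (endvalue - (endvalue * -10)):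
--                 c -= 1
--         elif endvalue == 0:
--             c -= 10
--
--     return c
-- ===== SOURCE B (Python) =====
-- def repeat_until_value(current, endvalue):
--     # Closed form: the loops just move current to a fixed bound.
--     if endvalue == current:
--         return current
--     if endvalue == 0:
--         return current - 10 if current > 0 else current + 10
--     # moving toward endvalue in the direction of its sign -> bound 11*endvalue,
--     # otherwise bound -9*endvalue
--     if (endvalue > current) == (endvalue > 0):
--         return 11 * endvalue
--     return -9 * endvalue
-- ===== Notes on version B (the rewrite author's own statement) =====
-- stated objective: faster
-- what changed: Replaced the unit-step while loops with an O(1) closed form: the result is 11*endvalue or -9*endvalue (or current±10 when endvalue is 0) chosen by sign/comparison cases.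
import Mathlib
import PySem

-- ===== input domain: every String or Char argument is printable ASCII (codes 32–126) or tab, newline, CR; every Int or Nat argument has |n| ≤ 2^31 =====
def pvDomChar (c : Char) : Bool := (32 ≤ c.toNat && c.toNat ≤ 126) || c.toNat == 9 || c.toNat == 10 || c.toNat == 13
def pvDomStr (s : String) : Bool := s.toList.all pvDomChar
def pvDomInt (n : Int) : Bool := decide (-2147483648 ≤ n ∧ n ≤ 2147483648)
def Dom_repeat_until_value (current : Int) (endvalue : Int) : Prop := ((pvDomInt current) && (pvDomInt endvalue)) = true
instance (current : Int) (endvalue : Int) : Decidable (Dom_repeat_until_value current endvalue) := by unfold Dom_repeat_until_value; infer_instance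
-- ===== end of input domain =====

-- ===== PORT A =====
-- B replaces A's unit-step while loops by an O(1) closed form (asymptotically faster).
-- `while c < t: c += 1`
def pvWhileInc (c t : Int) : Int :=
  if c < t then pvWhileInc (c + 1) t else c
termination_by (t - c).toNat
decreasing_by omega

-- `while c > t: c -= 1`
def pvWhileDec (c t : Int) : Int :=
  if c > t then pvWhileDec (c - 1) t else c
termination_by (c - t).toNat
decreasing_by omega

def repeat_until_value (current : Int) (endvalue : Int) : Int :=
  let c := current
  if endvalue > c then
    if endvalue > 0 then pvWhileInc c (endvalue + endvalue * 10)
    else if endvalue < 0 then pvWhileInc c (endvalue + endvalue * (-10))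
    else if endvalue == 0 then c + 10
    else c
  else if endvalue < c then
    if endvalue > 0 then pvWhileDec c (endvalue - endvalue * 10)
    else if endvalue < 0 then pvWhileDec c (endvalue - endvalue * (-10))
    else if endvalue == 0 then c - 10
    else c
  else c

-- ===== PORT B =====
def repeat_until_value_alt (current : Int) (endvalue : Int) : Int :=
  if endvalue == current then current
  else if endvalue == 0 then (if current > 0 then current - 10 else current + 10)
  else if decide (endvalue > current) == decide (endvalue > 0) then 11 * endvalue
  else -9 * endvalue

-- ===== PRECONDITION & SPEC =====
def Spec_repeat_until_value (current : Int) (endvalue : Int) (out : Int) : Prop := out = repeat_until_value_alt current endvalue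
instance (current : Int) (endvalue : Int) (out : Int) : Decidable (Spec_repeat_until_value current endvalue out) := by unfold Spec_repeat_until_value; infer_instance

-- ===== CLAIM (what is proved, stated in full; the proofs are below) =====
def Claim_equal_repeat_until_value : Prop := ∀ (current : Int) (endvalue : Int), Dom_repeat_until_value current endvalue → Spec_repeat_until_value current endvalue (repeat_until_value current endvalue)

-- ===== LEMMAS AND PROOFS =====
theorem pvWhileInc_eq (c t : Int) : pvWhileInc c t = if c < t then t else c := by
  fun_induction pvWhileInc c t with
  | case1 c h ih => simp only [ih]; split_ifs <;> omega
  | case2 c h => simp [h]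

theorem pvWhileDec_eq (c t : Int) : pvWhileDec c t = if c > t then t else c := by
  fun_induction pvWhileDec c t with
  | case1 c h ih => simp only [ih]; split_ifs <;> omega
  | case2 c h => simp [h]

-- ===== VERDICT (by name: the statement is the Claim_ definition above) =====
theorem repeat_until_value_spec : Claim_equal_repeat_until_value := by
  intro current endvalue _
  unfold Spec_repeat_until_value repeat_until_value repeat_until_value_alt
  simp only [pvWhileInc_eq, pvWhileDec_eq, beq_iff_eq, decide_eq_decide]
  split_ifs <;> omega
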